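-- pv_equiv track=rewrite | github.com/Binhchuoizzz/AI_Security_Graph | src/data_publisher.py | _detect_label_column
-- ===== SOURCE A (Python) =====
-- def _detect_label_column(headers: list) -> str:
--     """Tự động phát hiện cột label từ CSV header."""
--     label_candidates = [
--         ' Label', 'Label', 'label', 'attack_cat', 'Attack',
--         'classification', 'class'
--     ]
--     for col in label_candidates:
--         if col in headers:
--             return col
--     return None
-- ===== SOURCE B (Python) =====
-- def _detect_label_column(headers: list) -> str:
--     """Single pass over headers, keeping the best (smallest) candidate rank."""
--     label_candidates = [
--         ' Label', 'Label', 'label', 'attack_cat', 'Attack',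
--         'classification', 'class'
--     ]
--     rank = {c: i for i, c in enumerate(label_candidates)}
--     best = None
--     for h in headers:
--         r = rank.get(h)
--         if r is not None and (best is None or r < best):
--             best = r
--     return label_candidates[best] if best is not None else None
-- ===== Notes on version B (the rewrite author's own statement) =====
-- stated objective: alternative
-- what changed: Inverts the iteration: instead of scanning the candidate list and testing membership in headers (an inner scan per candidate), B builds a rank dict over the 7 candidates and makes a single pass over headers keeping the minimum rank seen, returning the candidate at that rank.
import Mathlib
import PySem

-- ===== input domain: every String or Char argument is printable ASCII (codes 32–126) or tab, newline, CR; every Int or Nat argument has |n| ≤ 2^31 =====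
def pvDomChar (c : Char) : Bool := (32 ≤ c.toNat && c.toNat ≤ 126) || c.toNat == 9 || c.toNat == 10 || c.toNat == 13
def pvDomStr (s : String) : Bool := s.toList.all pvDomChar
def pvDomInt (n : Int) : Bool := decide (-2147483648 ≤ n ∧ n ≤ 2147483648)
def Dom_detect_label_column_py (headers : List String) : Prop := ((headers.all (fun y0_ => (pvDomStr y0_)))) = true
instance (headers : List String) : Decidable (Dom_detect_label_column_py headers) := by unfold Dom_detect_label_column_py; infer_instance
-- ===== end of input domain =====

-- B inverts the iteration (one pass over headers keeping the minimum candidate rank) instead of A's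
-- candidate-by-candidate membership scan; objective: alternative (same result, different traversal).

-- ===== PORT A =====
-- the literal label_candidates list of the Python (both versions define the same literal)
def labelCandidates : List String :=
  [" Label", "Label", "label", "attack_cat", "Attack", "classification", "class"]

-- A's loop over label_candidates: return the first candidate contained in headers
def detectGoA (headers : List String) : List String → Option String
  | [] => none
  | c :: rest => if headers.contains c then some c else detectGoA headers rest

def detect_label_column_py (headers : List String) : Option String :=
  detectGoA headers labelCandidates

-- ===== PORT B =====
-- the dict comprehension {c: i for i, c in enumerate(label_candidates)}
def rankDict : PySem.Dict String Int :=
  PySem.Dict.ofList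
    [(" Label", 0), ("Label", 1), ("label", 2), ("attack_cat", 3),
     ("Attack", 4), ("classification", 5), ("class", 6)]

-- B's loop body: r = rank.get(h); if r is not None and (best is None or r < best): best = r
def detectStepB (best : Option Int) (h : String) : Option Int :=
  match PySem.Dict.get? rankDict h with
  | none => best
  | some r =>
    match best with
    | none => some r
    | some b => if r < b then some r else best

def detect_label_column_py_alt (headers : List String) : Option String :=
  let best := headers.foldl detectStepB none
  match best with
  | none => none
  | some b => PySem.List.pyGet? labelCandidates b   -- label_candidates[best] (in range here)

-- ===== PRECONDITION & SPEC =====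
def Spec_detect_label_column_py (headers : List String) (out : Option String) : Prop := out = detect_label_column_py_alt headers
instance (headers : List String) (out : Option String) : Decidable (Spec_detect_label_column_py headers out) := by unfold Spec_detect_label_column_py; infer_instance

-- ===== CLAIM (what is proved, stated in full; the proofs are below) =====
def Claim_equal_detect_label_column_py : Prop := ∀ (headers : List String), Dom_detect_label_column_py headers → Spec_detect_label_column_py headers (detect_label_column_py headers)

-- ===== LEMMAS AND PROOFS =====

-- min on Option Int, none = +∞
def omin : Option Int → Option Int → Option Int
  | none, b => b
  | some a, none => some a
  | some a, some b => some (min a b)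

theorem omin_none_right (a : Option Int) : omin a none = a := by
  cases a <;> rfl

theorem omin_assoc (a b c : Option Int) : omin (omin a b) c = omin a (omin b c) := by
  cases a <;> cases b <;> cases c <;> simp [omin, min_assoc]

-- rank of h in a candidate list: position of first occurrence
def rankIn : List String → String → Option Int
  | [], _ => none
  | c :: t, h => if h = c then some 0 else (rankIn t h).map (· + 1)

theorem rank_eq (h : String) : PySem.Dict.get? rankDict h = rankIn labelCandidates h := by
  by_cases h1 : h = " Label"
  · subst h1; decide
  by_cases h2 : h = "Label"
  · subst h2; decide
  by_cases h3 : h = "label"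
  · subst h3; decide
  by_cases h4 : h = "attack_cat"
  · subst h4; decide
  by_cases h5 : h = "Attack"
  · subst h5; decide
  by_cases h6 : h = "classification"
  · subst h6; decide
  by_cases h7 : h = "class"
  · subst h7; decide
  have hk : rankDict.keys = labelCandidates := by rfl
  have lhs : PySem.Dict.get? rankDict h = none := by
    rw [PySem.Dict.get?_eq_none_iff_not_mem_keys, hk]
    intro hm
    simp only [labelCandidates, List.mem_cons, List.not_mem_nil, or_false] at hm
    rcases hm with e | e | e | e | e | e | e <;> [exact h1 e; exact h2 e; exact h3 e;
      exact h4 e; exact h5 e; exact h6 e; exact h7 e]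
  have rhs : rankIn labelCandidates h = none := by
    simp [labelCandidates, rankIn, h1, h2, h3, h4, h5, h6, h7]
  rw [lhs, rhs]

theorem step_eq_omin (best : Option Int) (h : String) :
    detectStepB best h = omin best (rankIn labelCandidates h) := by
  rw [detectStepB, rank_eq]
  cases rankIn labelCandidates h with
  | none => cases best <;> rfl
  | some r =>
    cases best with
    | none => rfl
    | some b =>
      simp only [omin]
      by_cases hrb : r < b
      · simp [hrb, min_eq_right (le_of_lt hrb)]
      · simp [hrb, min_eq_left (not_lt.mp hrb)]

-- minimum rank among headers (w.r.t. candidate list cs)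
def minRank (cs : List String) (headers : List String) : Option Int :=
  headers.foldl (fun b h => omin b (rankIn cs h)) none

theorem foldl_omin (f : String → Option Int) :
    ∀ (t : List String) (b : Option Int),
      t.foldl (fun b h => omin b (f h)) b = omin b (t.foldl (fun b h => omin b (f h)) none) := by
  intro t
  induction t with
  | nil => intro b; simp [omin_none_right]
  | cons h t ih =>
    intro b
    simp only [List.foldl]
    rw [ih (omin b (f h)), ih (omin none (f h)), omin_assoc]
    rfl

theorem minRank_cons (cs : List String) (h : String) (t : List String) :
    minRank cs (h :: t) = omin (rankIn cs h) (minRank cs t) := by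
  simp only [minRank, List.foldl]
  rw [foldl_omin (rankIn cs) t (omin none (rankIn cs h))]
  rfl

theorem rankIn_nonneg : ∀ (cs : List String) (h : String) (r : Int),
    rankIn cs h = some r → 0 ≤ r := by
  intro cs
  induction cs with
  | nil => intro h r hr; simp [rankIn] at hr
  | cons c t ih =>
    intro h r hr
    simp only [rankIn] at hr
    split_ifs at hr with hc
    · simp only [Option.some.injEq] at hr; omega
    · rcases Option.map_eq_some_iff.mp hr with ⟨r', hr', rfl⟩
      have := ih h r' hr'
      omega

theorem minRank_nonneg (cs : List String) :
    ∀ (headers : List String) (r : Int), minRank cs headers = some r → 0 ≤ r := by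
  intro headers
  induction headers with
  | nil => intro r hr; simp [minRank, List.foldl] at hr
  | cons h t ih =>
    intro r hr
    rw [minRank_cons] at hr
    cases hx : rankIn cs h with
    | none => exact ih r (by rwa [hx] at hr)
    | some v =>
      have hv := rankIn_nonneg cs h v hx
      rw [hx] at hr
      cases hy : minRank cs t with
      | none => rw [hy] at hr; simp only [omin, Option.some.injEq] at hr; omega
      | some w =>
        have hw := ih w hy
        rw [hy] at hr
        simp only [omin, Option.some.injEq] at hr
        omega

-- if some header has rank v, the minimum exists and is ≤ v
theorem minRank_le (cs : List String) :
    ∀ (headers : List String) (h : String) (v : Int), h ∈ headers → rankIn cs h = some v →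
      ∃ r, minRank cs headers = some r ∧ r ≤ v := by
  intro headers
  induction headers with
  | nil => intro h v hmem; simp at hmem
  | cons x t ih =>
    intro h v hmem hv
    rw [minRank_cons]
    rcases List.mem_cons.mp hmem with rfl | hmem'
    · rw [hv]
      cases hy : minRank cs t with
      | none => exact ⟨v, rfl, le_refl v⟩
      | some w => exact ⟨min v w, rfl, min_le_left v w⟩
    · rcases ih h v hmem' hv with ⟨r, hr, hle⟩
      rw [hr]
      cases hx : rankIn cs x with
      | none => exact ⟨r, rfl, hle⟩
      | some u => exact ⟨min u r, rfl, le_trans (min_le_right u r) hle⟩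

-- if no header equals the head candidate, ranks all shift by one
theorem minRank_shift (c : String) (cs : List String) :
    ∀ (headers : List String), (∀ h ∈ headers, h ≠ c) →
      minRank (c :: cs) headers = (minRank cs headers).map (· + 1) := by
  intro headers
  induction headers with
  | nil => intro _; rfl
  | cons x t ih =>
    intro hne
    rw [minRank_cons, minRank_cons, ih (fun h hh => hne h (List.mem_cons_of_mem x hh))]
    have hx : rankIn (c :: cs) x = (rankIn cs x).map (· + 1) := by
      simp only [rankIn]
      rw [if_neg (hne x (List.mem_cons_self))]
    rw [hx]
    cases rankIn cs x <;> cases minRank cs t <;> simp [omin]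

theorem contains_iff (headers : List String) (c : String) :
    headers.contains c = true ↔ c ∈ headers := by
  simp

-- MAIN: A's first-match over candidates = index into candidates at B's minimum rank
theorem findFirst_eq : ∀ (cs headers : List String),
    detectGoA headers cs = (minRank cs headers).bind (fun r => PySem.List.pyGet? cs r) := by
  intro cs
  induction cs with
  | nil =>
    intro headers
    simp only [detectGoA]
    cases h : minRank [] headers with
    | none => rfl
    | some r => simp [PySem.List.pyGet?, PySem.List.pyIdx?]
  | cons c t ih =>
    intro headers
    simp only [detectGoA]
    by_cases hc : headers.contains c = true
    · rw [if_pos hc]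
      have hmem : c ∈ headers := (contains_iff headers c).mp hc
      have hrk : rankIn (c :: t) c = some 0 := by simp [rankIn]
      rcases minRank_le (c :: t) headers c 0 hmem hrk with ⟨r, hr, hle⟩
      have h0 : 0 ≤ r := minRank_nonneg (c :: t) headers r hr
      have : r = 0 := le_antisymm hle h0
      subst this
      rw [hr]
      simp [PySem.List.pyGet?, PySem.List.pyIdx?]
    · rw [if_neg hc]
      have hne : ∀ h ∈ headers, h ≠ c := by
        intro h hh heq
        exact hc ((contains_iff headers c).mpr (heq ▸ hh))
      rw [minRank_shift c t headers hne, ih headers]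
      cases hm : minRank t headers with
      | none => rfl
      | some r =>
        have h0 : 0 ≤ r := minRank_nonneg t headers r hm
        simp only [Option.map_some, Option.bind_some]
        obtain ⟨n, rfl⟩ := Int.eq_ofNat_of_zero_le h0
        rw [show ((n : Int) + 1) = ((n : Int) + 1) from rfl]
        exact (PySem.List.pyGet?_cons_succ c t n).symm

theorem goB_eq_minRank (headers : List String) :
    headers.foldl detectStepB none = minRank labelCandidates headers := by
  have : detectStepB = fun b h => omin b (rankIn labelCandidates h) := by
    funext b h; exact step_eq_omin b h
  rw [this]; rfl

-- ===== VERDICT (by name: the statement is the Claim_ definition above) =====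
theorem detect_label_column_py_spec : Claim_equal_detect_label_column_py := by
  intro headers _
  unfold Spec_detect_label_column_py detect_label_column_py detect_label_column_py_alt
  rw [goB_eq_minRank, findFirst_eq labelCandidates headers]
  cases minRank labelCandidates headers <;> rfl
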